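-- pv_equiv track=rewrite | github.com/dydgjs200/algorithm | programmers/Algorithm/LV1. 햄버거 만들기.py | solution
-- ===== SOURCE A (Python) =====
-- def solution(ingredient):
--     answer = 0
--     lis = []
--
--     for i in ingredient:
--         lis.append(i)
--
--         if lis[-4:] == [1, 2, 3, 1]:
--             answer += 1
--
--             for j in range(4):
--                 lis.pop()
--
--     return answer
-- ===== SOURCE B (Python) =====
-- def solution(ingredient):
--     # Pushdown automaton: stack holds match-progress integers for the pattern
--     # [1, 2, 3, 1] instead of raw ingredient values.
--     pattern = [1, 2, 3, 1]
--     answer = 0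
--     stack = []
--     for x in ingredient:
--         b = stack[-1] if stack else 0
--         if 0 <= b < 4 and x == pattern[b]:
--             p = b + 1
--         elif x == 1:
--             p = 1
--         else:
--             p = 0
--         if p == 4:
--             del stack[-3:]
--             answer += 1
--         else:
--             stack.append(p)
--     return answer
-- ===== Notes on version B (the rewrite author's own statement) =====
-- stated objective: alternative
-- what changed: Replaces A's stack of raw ingredient values with a stack of KMP match-progress integers for the pattern [1,2,3,1]: each step reads the top progress, computes the next automaton state in O(1), and pops three entries on a full match, instead of re-slicing and comparing a 4-element window of raw values.
import Mathlib
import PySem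

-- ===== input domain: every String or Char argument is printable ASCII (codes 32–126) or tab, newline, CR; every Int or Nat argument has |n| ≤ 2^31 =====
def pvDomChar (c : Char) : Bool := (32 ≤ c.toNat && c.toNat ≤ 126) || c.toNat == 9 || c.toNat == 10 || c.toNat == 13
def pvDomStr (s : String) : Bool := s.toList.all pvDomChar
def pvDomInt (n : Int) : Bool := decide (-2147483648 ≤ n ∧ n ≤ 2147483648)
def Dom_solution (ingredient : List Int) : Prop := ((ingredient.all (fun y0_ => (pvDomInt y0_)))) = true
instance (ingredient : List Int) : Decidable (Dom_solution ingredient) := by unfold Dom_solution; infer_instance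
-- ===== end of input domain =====

-- B replaces A's stack of raw ingredient values by a stack of match-progress
-- integers (a pushdown automaton for the pattern [1,2,3,1]); same O(n) cost,
-- alternative data structure. (A also mutates nothing observable; both are pure.)

-- ===== PORT A =====
def solution (ingredient : List Int) : Int :=
  (ingredient.foldl (fun (st : Int × List Int) i =>
      -- lis.append(i)
      let lis := st.2 ++ [i]
      -- if lis[-4:] == [1, 2, 3, 1]:
      if PySem.List.slice lis (some (-4)) none = ([1, 2, 3, 1] : List Int) then
        -- for j in range(4): lis.pop()  — the slice equality forces len(lis) ≥ 4,
        -- so each pop() acts on a nonempty list and removes the last element (dropLast)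
        (st.1 + 1, (PySem.List.pyRange 0 4 1).foldl (fun l _ => l.dropLast) lis)
      else (st.1, lis)) (0, [])).1

-- ===== PORT B =====
def solution_alt (ingredient : List Int) : Int :=
  let pattern : List Int := [1, 2, 3, 1]
  (ingredient.foldl (fun (st : Int × List Int) x =>
      let stack := st.2
      -- b = stack[-1] if stack else 0
      let b := if stack ≠ [] then (PySem.List.pyGet? stack (-1)).getD 0 else 0
      -- p = b + 1 if 0 <= b < 4 and x == pattern[b] else (1 if x == 1 else 0)
      -- (pattern[b] is only reached under the 0 <= b < 4 guard, so getD's default is unreachable)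
      let p := if 0 ≤ b ∧ b < 4 ∧ x = (PySem.List.pyGet? pattern b).getD 0 then b + 1
               else if x = 1 then 1 else 0
      if p = 4 then
        -- del stack[-3:]
        (st.1 + 1, PySem.List.slice stack none (some (-3)))
      else (st.1, stack ++ [p])) (0, [])).1

-- ===== PRECONDITION & SPEC =====
def Spec_solution (ingredient : List Int) (out : Int) : Prop := out = solution_alt ingredient
instance (ingredient : List Int) (out : Int) : Decidable (Spec_solution ingredient out) := by unfold Spec_solution; infer_instance

-- ===== CLAIM (what is proved, stated in full; the proofs are below) =====
def Claim_equal_solution : Prop := ∀ (ingredient : List Int), Dom_solution ingredient → Spec_solution ingredient (solution ingredient)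

-- ===== LEMMAS AND PROOFS =====

-- A's loop body
def stepA : Int × List Int → Int → Int × List Int := fun st i =>
  let lis := st.2 ++ [i]
  if PySem.List.slice lis (some (-4)) none = ([1, 2, 3, 1] : List Int) then
    (st.1 + 1, (PySem.List.pyRange 0 4 1).foldl (fun l _ => l.dropLast) lis)
  else (st.1, lis)

-- B's loop body
def stepBody : Int × List Int → Int → Int × List Int := fun st x =>
  let stack := st.2
  let b := if stack ≠ [] then (PySem.List.pyGet? stack (-1)).getD 0 else 0
  let p := if 0 ≤ b ∧ b < 4 ∧ x = (PySem.List.pyGet? ([1,2,3,1] : List Int) b).getD 0 then b + 1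
           else if x = 1 then 1 else 0
  if p = 4 then (st.1 + 1, PySem.List.slice stack none (some (-3)))
  else (st.1, stack ++ [p])

-- B's automaton transition on progress value b and input x
def stepB (b x : Int) : Int :=
  if 0 ≤ b ∧ b < 4 ∧ x = (PySem.List.pyGet? ([1,2,3,1] : List Int) b).getD 0 then b + 1
  else if x = 1 then 1 else 0

theorem solution_eq_foldA (ingredient : List Int) :
    solution ingredient = (ingredient.foldl stepA (0, [])).1 := rfl

theorem solution_alt_eq_foldB (ingredient : List Int) :
    solution_alt ingredient = (ingredient.foldl stepBody (0, [])).1 := rfl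

-- invariant relating A's stack of raw values to B's stack of progress values
inductive PAInv : List Int → List Int → Prop
  | nil : PAInv [] []
  | snoc {lis ps : List Int} {x p : Int} :
      PAInv lis ps → p = stepB (ps.getLastD 0) x → p ≠ 4 → PAInv (lis ++ [x]) (ps ++ [p])

theorem suffix_snoc (ys l : List Int) (y x : Int) :
    (ys ++ [y]) <:+ (l ++ [x]) ↔ y = x ∧ ys <:+ l := by
  constructor
  · rintro ⟨t, ht⟩
    rw [show t ++ (ys ++ [y]) = (t ++ ys) ++ [y] by simp] at ht
    obtain ⟨h1, h2⟩ := List.append_singleton_inj.mp ht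
    exact ⟨h2, t, h1⟩
  · rintro ⟨rfl, t, rfl⟩; exact ⟨t, by simp⟩

theorem bval_eq (ps : List Int) :
    (if ps ≠ [] then (PySem.List.pyGet? ps (-1)).getD 0 else 0) = ps.getLastD 0 := by
  rcases ps.eq_nil_or_concat with rfl | ⟨l, a, rfl⟩
  · simp
  · simp [PySem.List.pyGet?_neg_one, List.getLastD_eq_getLast?]

-- explicit transition table of stepB
theorem stepB_one (b : Int) : stepB b 1 = if b = 3 then 4 else 1 := by
  by_cases hb : 0 ≤ b ∧ b < 4
  · obtain ⟨h0, h4⟩ := hb; interval_cases b <;> decide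
  · unfold stepB
    rw [if_neg (by tauto), if_pos rfl, if_neg (by omega)]

theorem stepB_two (b : Int) : stepB b 2 = if b = 1 then 2 else 0 := by
  by_cases hb : 0 ≤ b ∧ b < 4
  · obtain ⟨h0, h4⟩ := hb; interval_cases b <;> decide
  · unfold stepB
    rw [if_neg (by tauto), if_neg (by omega), if_neg (by omega)]

theorem stepB_three (b : Int) : stepB b 3 = if b = 2 then 3 else 0 := by
  by_cases hb : 0 ≤ b ∧ b < 4
  · obtain ⟨h0, h4⟩ := hb; interval_cases b <;> decide
  · unfold stepB
    rw [if_neg (by tauto), if_neg (by omega), if_neg (by omega)]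

theorem stepB_other (b x : Int) (h1 : x ≠ 1) (h2 : x ≠ 2) (h3 : x ≠ 3) : stepB b x = 0 := by
  unfold stepB
  rw [if_neg, if_neg h1]
  rintro ⟨h0, h4, hx⟩
  interval_cases b <;> simp_all

-- the top progress value characterises which prefixes of the pattern are suffixes of A's stack
theorem PAInv.last_iff {lis ps : List Int} (h : PAInv lis ps) :
    ((ps.getLastD 0 = 1 ↔ ([1] : List Int) <:+ lis) ∧
     (ps.getLastD 0 = 2 ↔ ([1, 2] : List Int) <:+ lis) ∧
     (ps.getLastD 0 = 3 ↔ ([1, 2, 3] : List Int) <:+ lis)) := by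
  induction h with
  | nil => simp
  | @snoc lis ps x p _ hp hne ih =>
    obtain ⟨ih1, ih2, ih3⟩ := ih
    subst hp
    have hlast : (ps ++ [stepB (ps.getLastD 0) x]).getLastD 0 = stepB (ps.getLastD 0) x := by
      simp [List.getLastD_eq_getLast?]
    rw [hlast]
    rw [show ([1] : List Int) = [] ++ [1] by rfl, suffix_snoc]
    rw [show ([1, 2] : List Int) = [1] ++ [2] by rfl, suffix_snoc]
    rw [show ([1, 2, 3] : List Int) = [1, 2] ++ [3] by rfl, suffix_snoc]
    rcases eq_or_ne x 1 with rfl | hx1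
    · have hb3 : ps.getLastD 0 ≠ 3 := by
        intro hb; rw [stepB_one, if_pos hb] at hne; exact hne rfl
      rw [stepB_one, if_neg hb3]
      simp
    rcases eq_or_ne x 2 with rfl | hx2
    · rw [stepB_two]
      refine ⟨by split_ifs <;> simp, ?_, by split_ifs <;> simp⟩
      constructor
      · intro hv
        split_ifs at hv with hb
        · exact ⟨rfl, ih1.mp hb⟩
        · omega
      · rintro ⟨-, hs⟩; rw [if_pos (ih1.mpr hs)]
    rcases eq_or_ne x 3 with rfl | hx3
    · rw [stepB_three]
      refine ⟨by split_ifs <;> simp, by split_ifs <;> simp, ?_⟩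
      constructor
      · intro hv
        split_ifs at hv with hb
        · exact ⟨rfl, ih2.mp hb⟩
        · omega
      · rintro ⟨-, hs⟩; rw [if_pos (ih2.mpr hs)]
    · rw [stepB_other _ _ hx1 hx2 hx3]
      simp [Ne.symm hx1, Ne.symm hx2, Ne.symm hx3]

theorem PAInv.pop3 {lis ps : List Int} (h : PAInv lis ps) (hsuf : ([1, 2, 3] : List Int) <:+ lis) :
    PAInv lis.dropLast.dropLast.dropLast ps.dropLast.dropLast.dropLast := by
  have hlen : 3 ≤ lis.length := by simpa using hsuf.length_le
  rcases h with _ | ⟨h1, _, _⟩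
  · simp at hlen
  case snoc lis1 ps1 x1 p1 =>
    rcases h1 with _ | ⟨h2, _, _⟩
    · simp at hlen
    case snoc lis2 ps2 x2 p2 =>
      rcases h2 with _ | ⟨h3, _, _⟩
      · simp at hlen
      case snoc lis3 ps3 x3 p3 =>
        simpa [List.dropLast_concat] using h3

theorem stepB_eq_four {b x : Int} (h : stepB b x = 4) : b = 3 ∧ x = 1 := by
  unfold stepB at h
  split_ifs at h with hg hx
  · obtain ⟨hb0, hb4, hxe⟩ := hg
    have hb3 : b = 3 := by omega
    subst hb3
    exact ⟨rfl, by simpa using hxe⟩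
  · omega
  · omega

theorem drop_of_suffix (ys l : List Int) (h : ys <:+ l) : l.drop (l.length - ys.length) = ys := by
  obtain ⟨t, rfl⟩ := h; simp

theorem dropLast3_eq_take (l : List Int) :
    l.dropLast.dropLast.dropLast = l.take (l.length - 3) := by
  simp [List.dropLast_eq_take, List.take_take, List.length_take]; omega

theorem loop_eq (ing : List Int) :
    ∀ (ansA ansB : Int) (lis ps : List Int), PAInv lis ps → ansA = ansB →
      (ing.foldl stepA (ansA, lis)).1 = (ing.foldl stepBody (ansB, ps)).1 := by
  induction ing with
  | nil => intro ansA ansB lis ps _ hans; simpa using hans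
  | cons x ing ih =>
    intro ansA ansB lis ps hrel hans
    subst hans
    simp only [List.foldl_cons]
    -- normalise B's step
    have hB : stepBody (ansA, ps) x =
        if stepB (ps.getLastD 0) x = 4 then (ansA + 1, PySem.List.slice ps none (some (-3)))
        else (ansA, ps ++ [stepB (ps.getLastD 0) x]) := by
      simp only [stepBody, stepB]; rw [bval_eq]
    by_cases h4 : stepB (ps.getLastD 0) x = 4
    · obtain ⟨hb3, hx1⟩ := stepB_eq_four h4
      subst hx1
      have hsuf3 : ([1, 2, 3] : List Int) <:+ lis := (hrel.last_iff.2.2).mp hb3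
      have hlen3 : 3 ≤ lis.length := hsuf3.length_le
      have hsuf4 : ([1, 2, 3, 1] : List Int) <:+ (lis ++ [1]) :=
        (suffix_snoc [1, 2, 3] lis 1 1).mpr ⟨rfl, hsuf3⟩
      -- A's condition holds
      have hcond : PySem.List.slice (lis ++ [1]) (some (-4)) none = ([1, 2, 3, 1] : List Int) := by
        rw [PySem.List.slice_from_neg_ofNat (lis ++ [1]) 4 (by omega)]
        have : (lis ++ [1]).length - ([1, 2, 3, 1] : List Int).length = (lis ++ [1]).length - 4 := by
          simp
        rw [← this, drop_of_suffix _ _ hsuf4]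
      have hA : stepA (ansA, lis) 1 = (ansA + 1, lis.dropLast.dropLast.dropLast) := by
        simp only [stepA, hcond, if_true]
        rw [show PySem.List.pyRange 0 4 1 = [0, 1, 2, 3] from by decide]
        simp
      have hB' : stepBody (ansA, ps) 1 = (ansA + 1, ps.dropLast.dropLast.dropLast) := by
        rw [hB, if_pos h4]
        rw [PySem.List.slice_to_neg_ofNat ps 3 (by omega), ← dropLast3_eq_take]
      rw [hA, hB']
      exact ih _ _ _ _ (hrel.pop3 hsuf3) rfl
    · -- A's condition fails
      have hcond : PySem.List.slice (lis ++ [x]) (some (-4)) none ≠ ([1, 2, 3, 1] : List Int) := by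
        intro he
        rw [PySem.List.slice_from_neg_ofNat (lis ++ [x]) 4 (by omega)] at he
        have hsuf4 : ([1, 2, 3, 1] : List Int) <:+ (lis ++ [x]) := he ▸ List.drop_suffix _ _
        obtain ⟨hx1, hsuf3⟩ := (suffix_snoc [1, 2, 3] lis 1 x).mp hsuf4
        subst hx1
        have hb3 : ps.getLastD 0 = 3 := (hrel.last_iff.2.2).mpr hsuf3
        apply h4
        rw [hb3]; unfold stepB
        rw [if_pos ⟨by omega, by omega, by decide⟩]
        norm_num
      have hA : stepA (ansA, lis) x = (ansA, lis ++ [x]) := by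
        simp only [stepA, if_neg hcond]
      rw [hA, hB, if_neg h4]
      exact ih _ _ _ _ (PAInv.snoc hrel rfl h4) rfl

-- ===== VERDICT (by name: the statement is the Claim_ definition above) =====
theorem solution_spec : Claim_equal_solution := by
  intro ingredient _
  unfold Spec_solution
  rw [solution_eq_foldA, solution_alt_eq_foldB]
  exact loop_eq ingredient 0 0 [] [] PAInv.nil rfl
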